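-- pv_equiv track=rewrite | github.com/Bombamio/Yandex | 3. Алгоритмы и структуры данных/7. Сортировки/B. Сортировка слиянием блоков.py | block_merger
-- ===== SOURCE A (Python) =====
-- def block_merger(len_data, data):
--     """Находит максимальное количество блоков для сортировки."""
--     result = 0
--     search_mas = set()
--     data_mas = set()
--     for n in range(len_data):
--         search_mas.add(n)
--         data_mas.add(data[n])
--         if search_mas == data_mas:
--             result += 1
--             search_mas = set()
--             data_mas = set()
--     return result
-- ===== SOURCE B (Python) =====
-- def block_merger(len_data, data):
--     """A block [start..n] closes when its distinct-value count,
--     minimum and maximum show the values are exactly {start..n}."""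
--     result = 0
--     start = 0
--     cnt = 0
--     mn = 0
--     mx = 0
--     seen = set()
--     for n in range(len_data):
--         v = data[n]
--         if v not in seen:
--             seen.add(v)
--             cnt += 1
--             if cnt == 1:
--                 mn = v
--                 mx = v
--             else:
--                 if v < mn:
--                     mn = v
--                 if v > mx:
--                     mx = v
--         if cnt == n - start + 1 and mn == start and mx == n:
--             result += 1
--             start = n + 1
--             cnt = 0
--             seen = set()
--     return result
-- ===== Notes on version B (the rewrite author's own statement) =====
-- stated objective: alternative
-- what changed: A rebuilds and compares the whole index-set and value-set at every iteration; B keeps only the block's start, distinct-value count, minimum and maximum, closing a block when cnt == n-start+1 and mn == start and mx == n, which is equivalent to the set equality.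
import Mathlib
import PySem

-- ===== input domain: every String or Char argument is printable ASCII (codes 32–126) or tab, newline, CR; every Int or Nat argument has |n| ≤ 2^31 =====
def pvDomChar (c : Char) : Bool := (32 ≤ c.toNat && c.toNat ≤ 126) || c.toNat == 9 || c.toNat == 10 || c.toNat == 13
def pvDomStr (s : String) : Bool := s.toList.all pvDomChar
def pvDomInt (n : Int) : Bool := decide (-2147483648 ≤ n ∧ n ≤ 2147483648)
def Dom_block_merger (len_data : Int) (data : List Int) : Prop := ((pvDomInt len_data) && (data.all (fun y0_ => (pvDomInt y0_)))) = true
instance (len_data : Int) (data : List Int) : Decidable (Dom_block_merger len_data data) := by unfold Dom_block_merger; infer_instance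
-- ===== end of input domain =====

-- B tracks each block's start, distinct-value count, min and max instead of building and comparing
-- the index/value sets each step; a block closes when cnt = n-start+1, mn = start and mx = n.

-- ===== PORT A =====
-- loop body of A's 'for n in range(len_data)' (data[n] is total pyGetD: in range under Pre_)
def blockStepA (data : List Int) (st : Int × List Int × List Int) (n : Int) :
    Int × List Int × List Int :=
  let search := PySem.Set.add st.2.1 n
  let dmas := PySem.Set.add st.2.2 (PySem.List.pyGetD data n 0)
  if PySem.Set.equal search dmas then (st.1 + 1, PySem.Set.empty, PySem.Set.empty)
  else (st.1, search, dmas)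

def block_merger (len_data : Int) (data : List Int) : Int :=
  ((PySem.List.pyRange 0 len_data 1).foldl (blockStepA data)
    (0, PySem.Set.empty, PySem.Set.empty)).1

-- ===== PORT B =====
-- loop body of B: state (result, start, cnt, mn, mx, seen)
def blockStepB (data : List Int) (st : Int × Int × Int × Int × Int × List Int) (n : Int) :
    Int × Int × Int × Int × Int × List Int :=
  let v := PySem.List.pyGetD data n 0
  let upd : Int × Int × Int × List Int :=
    if PySem.Set.contains st.2.2.2.2.2 v then (st.2.2.1, st.2.2.2.1, st.2.2.2.2.1, st.2.2.2.2.2)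
    else if st.2.2.1 + 1 == 1 then (st.2.2.1 + 1, v, v, PySem.Set.add st.2.2.2.2.2 v)
    else (st.2.2.1 + 1, (if v < st.2.2.2.1 then v else st.2.2.2.1),
          (if v > st.2.2.2.2.1 then v else st.2.2.2.2.1), PySem.Set.add st.2.2.2.2.2 v)
  if upd.1 == n - st.2.1 + 1 && upd.2.1 == st.2.1 && upd.2.2.1 == n then
    (st.1 + 1, n + 1, 0, upd.2.1, upd.2.2.1, PySem.Set.empty)
  else (st.1, st.2.1, upd.1, upd.2.1, upd.2.2.1, upd.2.2.2)

def block_merger_alt (len_data : Int) (data : List Int) : Int :=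
  ((PySem.List.pyRange 0 len_data 1).foldl (blockStepB data)
    (0, 0, 0, 0, 0, PySem.Set.empty)).1

-- ===== PRECONDITION & SPEC =====
-- Pre_ excludes exactly the inputs where A raises IndexError: data[n] for n in range(len_data)
-- needs len_data ≤ len(data) (negative len_data gives an empty range and is fine).
def Pre_block_merger (len_data : Int) (data : List Int) : Prop :=
  len_data ≤ (data.length : Int)
instance (len_data : Int) (data : List Int) : Decidable (Pre_block_merger len_data data) := by
  unfold Pre_block_merger; infer_instance

def pvWitness_block_merger : Int × List Int := (3, [1, 0, 2])

def Spec_block_merger (len_data : Int) (data : List Int) (out : Int) : Prop := out = block_merger_alt len_data data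
instance (len_data : Int) (data : List Int) (out : Int) : Decidable (Spec_block_merger len_data data out) := by unfold Spec_block_merger; infer_instance

-- ===== CLAIM (what is proved, stated in full; the proofs are below) =====
def Claim_equal_block_merger : Prop := ∀ (len_data : Int) (data : List Int), Dom_block_merger len_data data → Pre_block_merger len_data data → Spec_block_merger len_data data (block_merger len_data data)

-- ===== LEMMAS AND PROOFS =====

-- A set S of distinct integers, with minimum mn and maximum mx, equals {a..b} as a set
-- iff it has b-a+1 elements, mn = a and mx = b.
lemma set_eq_range_iff (S : List Int) (mn mx a b : Int)
    (hnd : S.Nodup) (hmn : mn ∈ S) (hmx : mx ∈ S)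
    (hbd : ∀ x ∈ S, mn ≤ x ∧ x ≤ mx) (hab : a ≤ b) :
    (PySem.Set.equal (PySem.List.pyRange a (b + 1) 1) S = true) ↔
      ((S.length : Int) = b - a + 1 ∧ mn = a ∧ mx = b) := by
  rw [PySem.Set.equal_iff]
  constructor
  · intro h
    have hmem : ∀ x : Int, (a ≤ x ∧ x < b + 1) ↔ x ∈ S := by
      intro x; rw [← h x, PySem.List.mem_pyRange_one]
    have ha : a ∈ S := (hmem a).1 ⟨le_refl a, by omega⟩
    have hb' : b ∈ S := (hmem b).1 ⟨hab, by omega⟩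
    have h1 := hbd a ha
    have h2 := hbd b hb'
    have h3 := (hmem mn).2 hmn
    have h4 := (hmem mx).2 hmx
    have hperm : (PySem.List.pyRange a (b + 1) 1).Perm S :=
      (List.perm_ext_iff_of_nodup (PySem.List.nodup_pyRange_one a (b + 1)) hnd).2
        (fun x => by rw [PySem.List.mem_pyRange_one]; exact hmem x)
    have hlen := hperm.length_eq
    rw [PySem.List.length_pyRange_one] at hlen
    refine ⟨by omega, by omega, by omega⟩
  · rintro ⟨hl, rfl, rfl⟩
    have hsub : S.toFinset ⊆ Finset.Icc mn mx := by
      intro y hy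
      rw [List.mem_toFinset] at hy
      rcases hbd y hy with ⟨h1, h2⟩
      exact Finset.mem_Icc.2 ⟨h1, h2⟩
    have hcard : S.toFinset.card = S.length := List.toFinset_card_of_nodup hnd
    have hicc : (Finset.Icc mn mx).card = (mx + 1 - mn).toNat := Int.card_Icc mn mx
    have heq : S.toFinset = Finset.Icc mn mx := by
      apply Finset.eq_of_subset_of_card_le hsub
      omega
    intro x
    rw [PySem.List.mem_pyRange_one]
    constructor
    · intro hx
      have : x ∈ S.toFinset := by
        rw [heq]; exact Finset.mem_Icc.2 ⟨hx.1, by omega⟩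
      exact List.mem_toFinset.1 this
    · intro hx
      rcases hbd x hx with ⟨h1, h2⟩
      exact ⟨h1, by omega⟩

-- the invariant linking B's state at loop position m to A's
def BlockInv (m start cnt mn mx : Int) (seen : List Int) : Prop :=
  0 ≤ start ∧ start ≤ m ∧ cnt = (seen.length : Int) ∧ seen.Nodup ∧
  (seen ≠ [] → mn ∈ seen ∧ mx ∈ seen ∧ ∀ x ∈ seen, mn ≤ x ∧ x ≤ mx)

lemma step_pres (data : List Int) (m r start cnt mn mx : Int) (seen : List Int)
    (hInv : BlockInv m start cnt mn mx seen) :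
    ∃ r2 start2 cnt2 mn2 mx2 seen2,
      blockStepB data (r, start, cnt, mn, mx, seen) m = (r2, start2, cnt2, mn2, mx2, seen2) ∧
      blockStepA data (r, PySem.List.pyRange start m 1, seen) m
        = (r2, PySem.List.pyRange start2 (m + 1) 1, seen2) ∧
      BlockInv (m + 1) start2 cnt2 mn2 mx2 seen2 := by
  obtain ⟨hs0, hsm, hcnt, hnd, hbnd⟩ := hInv
  set v := PySem.List.pyGetD data m 0 with hv
  -- the updated (cnt', mn', mx', seen') quadruple and its properties
  have hupd : ∃ cnt2 mn2 mx2 seen2,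
      (if PySem.Set.contains seen v then (cnt, mn, mx, seen)
       else if cnt + 1 == 1 then (cnt + 1, v, v, PySem.Set.add seen v)
       else (cnt + 1, (if v < mn then v else mn), (if v > mx then v else mx),
             PySem.Set.add seen v)) = (cnt2, mn2, mx2, seen2) ∧
      seen2 = PySem.Set.add seen v ∧ cnt2 = (seen2.length : Int) ∧ seen2.Nodup ∧
      mn2 ∈ seen2 ∧ mx2 ∈ seen2 ∧ ∀ x ∈ seen2, mn2 ≤ x ∧ x ≤ mx2 := by
    by_cases hin : v ∈ seen
    · have hc : PySem.Set.contains seen v = true := (PySem.Set.contains_iff seen v).2 hin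
      have hadd : PySem.Set.add seen v = seen := PySem.Set.add_of_mem hin
      have hne : seen ≠ [] := by intro h; exact List.not_mem_nil (h ▸ hin)
      rcases hbnd hne with ⟨h1, h2, h3⟩
      exact ⟨cnt, mn, mx, seen, by rw [if_pos hc], hadd.symm, hcnt, hnd, h1, h2, h3⟩
    · have hc : PySem.Set.contains seen v = false := by
        rw [Bool.eq_false_iff]
        intro h
        exact hin ((PySem.Set.contains_iff seen v).1 h)
      have hadd : PySem.Set.add seen v = seen ++ [v] := PySem.Set.add_of_not_mem hin
      have hnd2 : (seen ++ [v]).Nodup := by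
        refine List.Nodup.append hnd (List.nodup_singleton v) ?_
        intro a ha hb
        rw [List.mem_singleton] at hb
        subst hb
        exact hin ha
      by_cases hempty : seen = []
      · subst hempty
        have hc0 : cnt = 0 := by simpa using hcnt
        subst hc0
        refine ⟨1, v, v, [v], ?_, by simp [hadd], by simp, by simp, by simp, by simp, by simp⟩
        rw [if_neg (by simpa using hin), if_pos (by decide)]
        simp [hadd]
      · have hlen : seen.length ≠ 0 := by simpa [List.length_eq_zero_iff] using hempty
        have hcl : (cnt + 1 == 1) = false := by
          rw [beq_eq_false_iff_ne]
          omega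
        rcases hbnd hempty with ⟨h1, h2, h3⟩
        refine ⟨cnt + 1, (if v < mn then v else mn), (if v > mx then v else mx),
          seen ++ [v], ?_, hadd.symm, by simp [hcnt], hnd2, ?_, ?_, ?_⟩
        · rw [if_neg (by simpa using hin), if_neg (by simp [beq_iff_eq]; omega), hadd]
        · by_cases h : v < mn <;> simp [h, List.mem_append, h1]
        · by_cases h : v > mx <;> simp [h, List.mem_append, h2]
        · intro x hx
          rcases List.mem_append.1 hx with hx | hx
          · rcases h3 x hx with ⟨ha, hb⟩
            constructor
            · by_cases h : v < mn <;> simp [h] <;> omega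
            · by_cases h : v > mx <;> simp [h] <;> omega
          · simp at hx
            subst hx
            constructor
            · by_cases h : v < mn <;> simp [h]; omega
            · by_cases h : v > mx <;> simp [h]; omega
  obtain ⟨cnt2, mn2, mx2, seen2, hq, hseen2, hc2, hnd2, hm1, hm2, hm3⟩ := hupd
  -- seen2 is nonempty (it contains mn2)
  have hne2 : seen2 ≠ [] := by intro h; rw [h] at hm1; simp at hm1
  -- A's search set after adding m
  have hsearch : PySem.Set.add (PySem.List.pyRange start m 1) m
      = PySem.List.pyRange start (m + 1) 1 := by
    have hnm : m ∉ PySem.List.pyRange start m 1 := by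
      rw [PySem.List.mem_pyRange_one]; omega
    rw [PySem.Set.add_of_not_mem hnm, ← PySem.List.pyRange_one_succ_right hsm]
  -- both closing conditions are the same boolean
  have hcond : PySem.Set.equal (PySem.List.pyRange start (m + 1) 1) seen2
      = (cnt2 == m - start + 1 && mn2 == start && mx2 == m) := by
    rw [Bool.eq_iff_iff]
    rw [set_eq_range_iff seen2 mn2 mx2 start m hnd2 hm1 hm2 hm3 hsm]
    simp [Bool.and_eq_true, beq_iff_eq]
    omega
  refine ⟨?_, ?_, ?_, ?_, ?_, ?_, ?_, ?_, ?_⟩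
  case _ => exact if (cnt2 == m - start + 1 && mn2 == start && mx2 == m) then r + 1 else r
  case _ => exact if (cnt2 == m - start + 1 && mn2 == start && mx2 == m) then m + 1 else start
  case _ => exact if (cnt2 == m - start + 1 && mn2 == start && mx2 == m) then 0 else cnt2
  case _ => exact mn2
  case _ => exact mx2
  case _ => exact if (cnt2 == m - start + 1 && mn2 == start && mx2 == m) then [] else seen2
  · show blockStepB data (r, start, cnt, mn, mx, seen) m = _
    unfold blockStepB
    simp only [← hv]
    rw [show (if PySem.Set.contains seen v then (cnt, mn, mx, seen)
       else if cnt + 1 == 1 then (cnt + 1, v, v, PySem.Set.add seen v)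
       else (cnt + 1, (if v < mn then v else mn), (if v > mx then v else mx),
             PySem.Set.add seen v)) = (cnt2, mn2, mx2, seen2) from hq]
    by_cases hb : (cnt2 == m - start + 1 && mn2 == start && mx2 == m) = true
    · simp [hb, PySem.Set.empty]
    · rw [Bool.not_eq_true] at hb
      simp [hb]
  · show blockStepA data (r, PySem.List.pyRange start m 1, seen) m = _
    unfold blockStepA
    simp only [← hv]
    rw [show PySem.Set.add seen v = seen2 from hseen2.symm, hsearch, hcond]
    by_cases hb : (cnt2 == m - start + 1 && mn2 == start && mx2 == m) = true
    · simp [hb, PySem.Set.empty, PySem.List.pyRange_one_eq_nil (le_refl (m + 1))]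
    · rw [Bool.not_eq_true] at hb
      simp [hb]
  · -- the invariant at m + 1
    by_cases hb : (cnt2 == m - start + 1 && mn2 == start && mx2 == m) = true
    · simp only [hb, if_true]
      exact ⟨by omega, le_refl _, by simp, by simp, fun h => absurd rfl h⟩
    · rw [Bool.not_eq_true] at hb
      simp only [hb, Bool.false_eq_true, if_false]
      exact ⟨hs0, by omega, hc2, hnd2, fun _ => ⟨hm1, hm2, hm3⟩⟩

lemma fold_pres (data : List Int) (k : Nat) :
    ∀ (m r start cnt mn mx : Int) (seen : List Int), BlockInv m start cnt mn mx seen →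
    ∃ r2 start2 cnt2 mn2 mx2 seen2,
      (PySem.List.pyRange m (m + (k : Int)) 1).foldl (blockStepB data)
          (r, start, cnt, mn, mx, seen) = (r2, start2, cnt2, mn2, mx2, seen2) ∧
      (PySem.List.pyRange m (m + (k : Int)) 1).foldl (blockStepA data)
          (r, PySem.List.pyRange start m 1, seen)
        = (r2, PySem.List.pyRange start2 (m + (k : Int)) 1, seen2) ∧
      BlockInv (m + (k : Int)) start2 cnt2 mn2 mx2 seen2 := by
  induction k with
  | zero =>
    intro m r start cnt mn mx seen hInv
    refine ⟨r, start, cnt, mn, mx, seen, ?_, ?_, ?_⟩ <;>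
      simp [PySem.List.pyRange_one_eq_nil (by omega : m + (0:Nat) ≤ m)]
    · simpa using hInv
  | succ k ih =>
    intro m r start cnt mn mx seen hInv
    have hlt : m < m + ((k : Nat) + 1 : Nat) := by push_cast; omega
    rw [PySem.List.pyRange_one_cons hlt]
    obtain ⟨r1, start1, cnt1, mn1, mx1, seen1, hB, hA, hInv1⟩ :=
      step_pres data m r start cnt mn mx seen hInv
    have hcast : m + ((k : Nat) + 1 : Nat) = (m + 1) + (k : Int) := by push_cast; ring
    obtain ⟨r2, start2, cnt2, mn2, mx2, seen2, hB2, hA2, hInv2⟩ :=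
      ih (m + 1) r1 start1 cnt1 mn1 mx1 seen1 hInv1
    refine ⟨r2, start2, cnt2, mn2, mx2, seen2, ?_, ?_, ?_⟩
    · rw [List.foldl_cons, hB, hcast]; exact hB2
    · rw [List.foldl_cons, hA, hcast]; exact hA2
    · rw [hcast]; exact hInv2

-- ===== VERDICT (by name: the statement is the Claim_ definition above) =====
theorem block_merger_spec : Claim_equal_block_merger := by
  intro len_data data _hDom _hPre
  unfold Spec_block_merger block_merger block_merger_alt
  by_cases hneg : len_data ≤ 0
  · rw [PySem.List.pyRange_one_eq_nil hneg]
    simp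
  · push_neg at hneg
    have h0 : (0 : Int) + (len_data.toNat : Int) = len_data := by omega
    have hInv0 : BlockInv 0 0 0 0 0 PySem.Set.empty :=
      ⟨le_refl 0, le_refl 0, by simp [PySem.Set.empty], by simp [PySem.Set.empty],
        fun h => absurd rfl h⟩
    obtain ⟨r2, start2, cnt2, mn2, mx2, seen2, hB, hA, _⟩ :=
      fold_pres data len_data.toNat 0 0 0 0 0 0 PySem.Set.empty hInv0
    rw [h0] at hB hA
    rw [show PySem.List.pyRange 0 0 1 = PySem.Set.empty from
      PySem.List.pyRange_one_eq_nil (le_refl 0)] at hA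
    rw [hA, hB]
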